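-- pv_equiv track=rewrite | github.com/ahsanirfan961/Automated-Number-Plate-Detection---YOLOv8---TrOCR | src/anpr/ocr_reader.py | filter_by_common_length
-- ===== SOURCE A (Python) =====
-- from collections import Counter
--
-- def filter_by_common_length(words):
--   if not words:
--     return []
--   lengths = [len(word) for word in words]
--   length_counts = Counter(lengths)
--   most_common_length = length_counts.most_common(1)[0][0]
--   filtered_words = [word for word in words if len(word) == most_common_length]
--   return filtered_words
-- ===== SOURCE B (Python) =====
-- def filter_by_common_length(words):
--     buckets = {}
--     for w in words:
--         buckets.setdefault(len(w), []).append(w)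
--     best = None
--     for bucket in buckets.values():
--         if best is None or len(bucket) > len(best):
--             best = bucket
--     return [] if best is None else best
-- ===== Notes on version B (the rewrite author's own statement) =====
-- stated objective: alternative
-- what changed: Replaces the Counter + most_common + second filter pass with a single grouping pass into insertion-ordered length buckets, then one scan over the buckets returning the largest bucket directly (strict '>' so the first length wins ties, matching Counter.most_common).
import Mathlib
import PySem

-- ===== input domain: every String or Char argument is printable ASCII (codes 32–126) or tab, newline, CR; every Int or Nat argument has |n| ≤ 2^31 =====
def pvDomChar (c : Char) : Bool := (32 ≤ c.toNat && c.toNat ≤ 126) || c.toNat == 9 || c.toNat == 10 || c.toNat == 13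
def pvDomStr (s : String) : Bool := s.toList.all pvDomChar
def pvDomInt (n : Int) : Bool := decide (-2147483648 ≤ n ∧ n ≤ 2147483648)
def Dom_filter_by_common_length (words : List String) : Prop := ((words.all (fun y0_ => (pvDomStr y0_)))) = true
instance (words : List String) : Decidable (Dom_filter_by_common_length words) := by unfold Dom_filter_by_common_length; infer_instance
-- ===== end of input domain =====

-- B replaces Counter + most_common(1) + a second filter pass by one grouping pass into
-- insertion-ordered length buckets and one scan returning the largest bucket (alternative
-- decomposition, same behaviour incl. first-length-wins ties).


-- ===== PORT A =====
def filter_by_common_length (words : List String) : List String :=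
  if words = [] then []
  else
    let lengths := words.map (fun word => PySem.Str.len word)
    let length_counts := PySem.Dict.counter lengths
    let most_common_length := ((PySem.List.sorted length_counts.items (fun p => p.2) true).headD (0, 0)).1
    let filtered_words := words.filter (fun word => PySem.Str.len word == most_common_length)
    filtered_words

-- ===== PORT B =====
def filter_by_common_length_alt (words : List String) : List String :=
  let buckets := words.foldl (fun d w => d.modify (PySem.Str.len w) [] (fun l => l ++ [w])) PySem.Dict.empty
  let best := buckets.values.foldl (fun best b =>
      match best with
      | none => some b
      | some bb => if b.length > bb.length then some b else best) (none : Option (List String))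
  match best with
  | none => []
  | some b => b


-- ===== PRECONDITION & SPEC =====
def Spec_filter_by_common_length (words : List String) (out : List String) : Prop := out = filter_by_common_length_alt words
instance (words : List String) (out : List String) : Decidable (Spec_filter_by_common_length words out) := by unfold Spec_filter_by_common_length; infer_instance

-- ===== CLAIM (what is proved, stated in full; the proofs are below) =====
def Claim_equal_filter_by_common_length : Prop := ∀ (words : List String), Dom_filter_by_common_length words → Spec_filter_by_common_length words (filter_by_common_length words)

-- ===== LEMMAS AND PROOFS =====


lemma insertBy_cons {α : Type} (bef : α → α → Bool) (x a : α) (as : List α) :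
    PySem.List.insertBy bef x (a :: as)
      = if bef x a then x :: a :: as else a :: PySem.List.insertBy bef x as := by
  simp [PySem.List.insertBy]

lemma foldl_insertBy_head {α : Type} (bef : α → α → Bool) :
    ∀ (l : List α) (a : α) (as : List α), ∃ t,
      l.foldl (fun acc x => PySem.List.insertBy bef x acc) (a :: as)
        = (l.foldl (fun best x => if bef x best then x else best) a) :: t := by
  intro l
  induction l with
  | nil => intro a as; exact ⟨as, rfl⟩
  | cons x l ih =>
    intro a as
    simp only [List.foldl_cons, insertBy_cons]
    by_cases h : bef x a
    · simp only [h, if_true]; exact ih x (a :: as)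
    · simp only [h, if_false, Bool.false_eq_true]; exact ih a _

lemma map_fold_first_max {β γ : Type} (f : β → γ) (key : γ → Int) :
    ∀ (ks : List β) (k0 : β),
      (ks.map f).foldl (fun best x => if decide (key best < key x) then x else best) (f k0)
        = f (ks.foldl (fun best k => if decide (key (f best) < key (f k)) then k else best) k0) := by
  intro ks
  induction ks with
  | nil => intro k0; rfl
  | cons k ks ih =>
    intro k0
    simp only [List.map_cons, List.foldl_cons]
    by_cases h : key (f k0) < key (f k)
    · simp only [h, decide_true, if_true]; exact ih k
    · simp only [h, decide_false, if_false, Bool.false_eq_true]; exact ih k0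

lemma map_fold_best_some (g : Int → List String) :
    ∀ (ks : List Int) (k0 : Int),
      (ks.map g).foldl (fun best b =>
          match best with
          | none => some b
          | some bb => if b.length > bb.length then some b else best) (some (g k0))
        = some (g (ks.foldl (fun best k => if (g k).length > (g best).length then k else best) k0)) := by
  intro ks
  induction ks with
  | nil => intro k0; rfl
  | cons k ks ih =>
    intro k0
    simp only [List.map_cons, List.foldl_cons]
    by_cases h : (g k).length > (g k0).length
    · simp only [h, if_true]; exact ih k
    · simp only [h, if_false]; exact ih k0

lemma getD_mk_of_mem {κ ν : Type} [BEq κ] [LawfulBEq κ] (d0 : ν) :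
    ∀ (l : List (κ × ν)), (l.map Prod.fst).Nodup → ∀ k v, (k, v) ∈ l →
      (PySem.Dict.mk l).getD k d0 = v := by
  intro l
  induction l with
  | nil => intro _ k v h; simp at h
  | cons p rest ih =>
    intro hn k v hm
    obtain ⟨k0, v0⟩ := p
    have hn' := hn
    simp only [List.map_cons, List.nodup_cons] at hn'
    rcases List.mem_cons.mp hm with h | h
    · cases h
      simp [PySem.Dict.getD, PySem.Dict.get?_mk_cons]
    · have hne : (k0 == k) = false := by
        refine beq_eq_false_iff_ne.mpr ?_
        intro he; subst he
        exact hn'.1 (List.mem_map.mpr ⟨(k0, v), h, rfl⟩)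
      simp only [PySem.Dict.getD, PySem.Dict.get?_mk_cons, hne, Bool.false_eq_true, if_false]
      exact ih hn'.2 k v h

lemma items_eq_keys_map {κ ν : Type} [BEq κ] [LawfulBEq κ] (d : PySem.Dict κ ν) (d0 : ν)
    (h : d.keys.Nodup) :
    d.items = d.keys.map (fun k => (k, d.getD k d0)) := by
  obtain ⟨l⟩ := d
  have hk : (PySem.Dict.mk l).keys = l.map Prod.fst := by simp [PySem.Dict.keys]
  rw [hk] at h ⊢
  apply List.ext_getElem
  · simp
  · intro i h1 h2
    simp only [List.getElem_map]
    have hmem : l[i] ∈ l := List.getElem_mem _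
    have := getD_mk_of_mem d0 l h l[i].1 l[i].2 (by simpa using hmem)
    simp [this]

def pvBkt (words : List String) (k : Int) : List String :=
  words.filter (fun w => PySem.Str.len w == k)

def pvBuckets (words : List String) : PySem.Dict Int (List String) :=
  words.foldl (fun d w => d.modify (PySem.Str.len w) [] (fun l => l ++ [w])) PySem.Dict.empty

lemma buckets_keys (words : List String) :
    (pvBuckets words).keys = PySem.Set.ofList (words.map PySem.Str.len) := by
  unfold pvBuckets
  rw [PySem.Dict.keys_foldl_modify_key words PySem.Str.len [] (fun _ w l => l ++ [w])]
  simp [PySem.Dict.empty, PySem.Dict.keys, PySem.Set.update, PySem.Set.ofList_eq_foldl]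

lemma buckets_keys_nodup (words : List String) : (pvBuckets words).keys.Nodup := by
  unfold pvBuckets
  exact PySem.Dict.nodup_keys_foldl_modify_key words PySem.Str.len [] (fun _ w l => l ++ [w]) _
    (by simp [PySem.Dict.empty, PySem.Dict.keys])

lemma buckets_getD (words : List String) (k : Int) :
    (pvBuckets words).getD k [] = pvBkt words k := by
  unfold pvBuckets
  have h1 : words.foldl (fun d w => d.modify (PySem.Str.len w) [] (fun l => l ++ [w])) PySem.Dict.empty
      = (words.map (fun w => (PySem.Str.len w, w))).foldl
          (fun d p => d.modify p.1 [] (fun l => l ++ [p.2])) PySem.Dict.empty := by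
    rw [List.foldl_map]
  rw [h1, PySem.Dict.getD_foldl_modify_append]
  simp [PySem.Dict.empty, PySem.Dict.getD, PySem.Dict.get?, pvBkt, List.filter_map,
    Function.comp_def]

lemma count_eq_bkt_length (words : List String) (k : Int) :
    (words.map PySem.Str.len).count k = (pvBkt words k).length := by
  simp [List.count_eq_countP, pvBkt, List.countP_eq_length_filter, List.filter_map,
    Function.comp_def, PySem.Str.len]

theorem main_eq (words : List String) :
    filter_by_common_length words = filter_by_common_length_alt words := by
  cases words with
  | nil => rfl
  | cons w ws =>
    have hmem : PySem.Str.len w ∈ PySem.Set.ofList ((w :: ws).map PySem.Str.len) := by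
      rw [PySem.Set.mem_ofList]; simp
    cases hK : PySem.Set.ofList ((w :: ws).map PySem.Str.len) with
    | nil => rw [hK] at hmem; simp at hmem
    | cons k0 ks =>
      set L : List Int := (w :: ws).map PySem.Str.len with hLdef
      set g : Int → List String := pvBkt (w :: ws) with hgdef
      set M : Int := ks.foldl (fun best k => if (g k).length > (g best).length then k else best) k0
        with hMdef
      -- the two argmax step functions agree (counts = bucket sizes)
      have hsteps : (fun (best k : Int) =>
            if decide ((L.count best : Int) < (L.count k : Int)) then k else best)
          = (fun (best k : Int) => if (g k).length > (g best).length then k else best) := by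
        funext best k
        have h1 := count_eq_bkt_length (w :: ws) best
        have h2 := count_eq_bkt_length (w :: ws) k
        by_cases h : (g k).length > (g best).length
        · have hc : ((L.count best : Int) < (L.count k : Int)) := by
            rw [hLdef, h1, h2]; exact_mod_cast h
          simp [h, hc]
        · have hc : ¬ ((L.count best : Int) < (L.count k : Int)) := by
            rw [hLdef, h1, h2]; exact_mod_cast h
          simp [h, hc]
      -- A side: most_common(1)[0][0] is the first length of maximal count
      have hmost : ((PySem.List.sorted (PySem.Dict.counter L).items
            (fun p => p.2) true).headD (0, 0)).1 = M := by
        rw [PySem.Dict.items_counter, hK, PySem.List.sorted_rev_eq_foldl_insertBy,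
          List.map_cons, List.foldl_cons]
        beta_reduce
        rw [show PySem.List.insertBy (fun a b : Int × Int => decide (b.2 < a.2))
            (k0, (L.count k0 : Int)) [] = [(k0, (L.count k0 : Int))] from by
          simp [PySem.List.insertBy]]
        obtain ⟨t, ht⟩ := foldl_insertBy_head (fun x best : Int × Int => decide (best.2 < x.2))
          (ks.map (fun k => (k, (L.count k : Int)))) (k0, (L.count k0 : Int)) []
        rw [ht, List.headD_cons,
          map_fold_first_max (fun k : Int => (k, (L.count k : Int))) (fun p => p.2)]
        beta_reduce
        rw [hsteps]
      have hA : filter_by_common_length (w :: ws) = g M := by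
        unfold filter_by_common_length
        rw [if_neg (by simp)]
        simp only
        rw [hmost]
        rfl
      -- B side: the buckets' values are the buckets of the distinct lengths, in order
      have hitems : (pvBuckets (w :: ws)).items = (k0 :: ks).map (fun k => (k, g k)) := by
        rw [items_eq_keys_map (pvBuckets (w :: ws)) [] (buckets_keys_nodup _), buckets_keys, hK]
        exact List.map_congr_left (fun k _ => by rw [buckets_getD])
      have hvalues : (pvBuckets (w :: ws)).values = (k0 :: ks).map g := by
        simp only [PySem.Dict.values, hitems, List.map_map]
        rfl
      have hB : filter_by_common_length_alt (w :: ws) = g M := by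
        unfold filter_by_common_length_alt
        simp only
        rw [show ((w :: ws).foldl (fun d w => d.modify (PySem.Str.len w) [] (fun l => l ++ [w]))
          PySem.Dict.empty) = pvBuckets (w :: ws) from rfl]
        rw [hvalues, List.map_cons, List.foldl_cons]
        simp only [map_fold_best_some g ks k0]
        rw [← hMdef]
      rw [hA, hB]

-- ===== VERDICT (by name: the statement is the Claim_ definition above) =====
theorem filter_by_common_length_spec : Claim_equal_filter_by_common_length := by
  intro words _
  unfold Spec_filter_by_common_length
  exact main_eq words
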